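-- pv_equiv track=rewrite | github.com/schio/algorithm_test | programmers/best_album.py | solution
-- ===== SOURCE A (Python) =====
-- def solution(genres, plays):
--     from collections import defaultdict
--     each_play_cnt = defaultdict(list)
--     genres_cnt = defaultdict(int)
--
--     for i in range(len(genres)):
--         genres_cnt[genres[i]] += plays[i]
--         each_play_cnt[genres[i]].append((plays[i], i))
--
--
--     answer = []
--     for genres_key, _ in sorted(genres_cnt.items(), key=lambda x: x[1], reverse=True):
--         for plays_key in sorted(each_play_cnt[genres_key], key=lambda x: x[0],  reverse=True)[:2]:
--             answer.append(plays_key[1])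
--
--     return answer
-- ===== SOURCE B (Python) =====
-- def solution(genres, plays):
--     # one global stable sort of indices instead of a sort per genre
--     totals = {}
--     for i in range(len(genres)):
--         totals[genres[i]] = totals.get(genres[i], 0) + plays[i]
--     order = sorted(range(len(genres)), key=lambda j: -plays[j])
--     answer = []
--     for g, _ in sorted(totals.items(), key=lambda kv: kv[1], reverse=True):
--         answer += [i for i in order if genres[i] == g][:2]
--     return answer
-- ===== Notes on version B (the rewrite author's own statement) =====
-- stated objective: alternative
-- what changed: Instead of sorting each genre's (play, index) bucket separately, B performs one global stable sort of all track indices by descending plays and takes each genre's first two indices from that single order (genre totals and their descending order are computed as before).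
import Mathlib
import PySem

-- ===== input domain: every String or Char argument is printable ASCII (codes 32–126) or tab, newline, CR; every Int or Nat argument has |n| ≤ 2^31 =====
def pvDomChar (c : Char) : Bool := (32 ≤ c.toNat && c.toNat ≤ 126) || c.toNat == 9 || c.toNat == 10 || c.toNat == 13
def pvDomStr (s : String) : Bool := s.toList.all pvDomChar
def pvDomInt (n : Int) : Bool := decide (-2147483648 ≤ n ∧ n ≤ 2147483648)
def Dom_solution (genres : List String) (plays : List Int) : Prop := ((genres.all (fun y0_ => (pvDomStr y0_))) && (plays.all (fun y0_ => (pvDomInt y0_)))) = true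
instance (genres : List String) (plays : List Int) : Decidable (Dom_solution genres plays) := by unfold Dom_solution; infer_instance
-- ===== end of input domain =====

-- B replaces A's per-genre sorts by ONE global stable sort of all track indices
-- (descending plays, ties in ascending index order) and takes each genre's first
-- two indices from that single order (alternative decomposition, same result).

-- ===== PORT A =====
def solution (genres : List String) (plays : List Int) : List Int :=
  let st :=
    (PySem.List.pyRange 0 (genres.length : Int) 1).foldl
      (fun (st : PySem.Dict String Int × PySem.Dict String (List (Int × Int))) i =>
        (st.1.insert (PySem.List.pyGetD genres i "")
            (st.1.getD (PySem.List.pyGetD genres i "") 0 + PySem.List.pyGetD plays i 0),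
         st.2.insert (PySem.List.pyGetD genres i "")
            (st.2.getD (PySem.List.pyGetD genres i "") [] ++ [(PySem.List.pyGetD plays i 0, i)])))
      (PySem.Dict.empty, PySem.Dict.empty)
  (PySem.List.sorted st.1.items (fun kv => kv.2) true).foldl
    (fun answer kv =>
      ((PySem.List.sorted (st.2.getD kv.1 []) (fun x => x.1) true).take 2).foldl
        (fun answer pk => answer ++ [pk.2]) answer)
    []

-- ===== PORT B =====
def solution_alt (genres : List String) (plays : List Int) : List Int :=
  let totals :=
    (PySem.List.pyRange 0 (genres.length : Int) 1).foldl
      (fun (d : PySem.Dict String Int) i =>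
        d.insert (PySem.List.pyGetD genres i "")
          (d.getD (PySem.List.pyGetD genres i "") 0 + PySem.List.pyGetD plays i 0))
      PySem.Dict.empty
  let order :=
    PySem.List.sorted (PySem.List.pyRange 0 (genres.length : Int) 1)
      (fun j => -(PySem.List.pyGetD plays j 0)) false
  (PySem.List.sorted totals.items (fun kv => kv.2) true).foldl
    (fun answer kv =>
      answer ++ (order.filter (fun i => PySem.List.pyGetD genres i "" == kv.1)).take 2)
    []

-- ===== PRECONDITION & SPEC =====
-- Python A raises IndexError at plays[i] when plays is shorter than genres; Pre_ excludes exactly those inputs.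
def Pre_solution (genres : List String) (plays : List Int) : Prop :=
  genres.length ≤ plays.length
instance (genres : List String) (plays : List Int) : Decidable (Pre_solution genres plays) := by
  unfold Pre_solution; infer_instance
def pvWitness_solution : List String × List Int :=
  (["pop", "pop", "classic", "classic", "pop"], [500, 600, 150, 800, 2500])
def Spec_solution (genres : List String) (plays : List Int) (out : List Int) : Prop := out = solution_alt genres plays
instance (genres : List String) (plays : List Int) (out : List Int) : Decidable (Spec_solution genres plays out) := by unfold Spec_solution; infer_instance

-- ===== CLAIM (what is proved, stated in full; the proofs are below) =====
def Claim_equal_solution : Prop := ∀ (genres : List String) (plays : List Int), Dom_solution genres plays → Pre_solution genres plays → Spec_solution genres plays (solution genres plays)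

-- ===== LEMMAS AND PROOFS =====

-- inserting x into ys keeps Pairwise S, given how `before` interacts with S
lemma insertBy_pairwise {α : Type} (S : α → α → Prop) (before : α → α → Bool) (x : α)
    (ys : List α) (h1 : ys.Pairwise S)
    (h2 : ∀ y, before x y = true → S x y)
    (h3 : ∀ y ∈ ys, before x y = false → S y x)
    (h4 : ∀ a b, S a b → before x a = true → S x b) :
    (PySem.List.insertBy before x ys).Pairwise S := by
  induction ys with
  | nil => simp [PySem.List.insertBy]
  | cons y t ih =>
      rw [List.pairwise_cons] at h1
      by_cases hb : before x y = true
      · simp [PySem.List.insertBy, hb]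
        refine ⟨⟨h2 y hb, fun b hbm => h4 y b (h1.1 b hbm) hb⟩, h1.1, h1.2⟩
      · simp only [PySem.List.insertBy, hb, if_false, Bool.false_eq_true]
        rw [List.pairwise_cons]
        constructor
        · intro z hz
          rcases (PySem.List.mem_insertBy before x z t).1 hz with rfl | hzt
          · exact h3 y (by simp) (by simpa using hb)
          · exact h1.1 z hzt
        · exact ih h1.2 (fun z hz hbz => h3 z (by simp [hz]) hbz)

-- the insertion-sort fold produces a list Pairwise in the stable order S
lemma foldl_insertBy_pairwise {α : Type} (S : α → α → Prop) (before : α → α → Bool)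
    (l : List α)
    (h2 : ∀ x ∈ l, ∀ y, before x y = true → S x y)
    (h4 : ∀ x ∈ l, ∀ a b, S a b → before x a = true → S x b)
    (hl : l.Pairwise (fun a b => before b a = false → S a b)) :
    (l.foldl (fun acc x => PySem.List.insertBy before x acc) []).Pairwise S := by
  suffices H : ∀ (acc : List α), acc.Pairwise S →
      (∀ x ∈ l, ∀ y ∈ acc, before x y = false → S y x) →
      (l.foldl (fun acc x => PySem.List.insertBy before x acc) acc).Pairwise S by
    exact H [] (by simp) (by simp)
  induction l with
  | nil => intro acc ha _; simpa using ha
  | cons x t ih =>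
      intro acc ha hcross
      rw [List.pairwise_cons] at hl
      simp only [List.foldl_cons]
      refine ih (fun z hz y hy => h2 z (by simp [hz]) y hy)
        (fun z hz a b => h4 z (by simp [hz]) a b) hl.2
        (PySem.List.insertBy before x acc) ?_ ?_
      · exact insertBy_pairwise S before x acc ha (h2 x (by simp))
          (fun y hy => hcross x (by simp) y hy) (h4 x (by simp))
      · intro z hz y hy hby
        rcases (PySem.List.mem_insertBy before x y acc).1 hy with rfl | hya
        · exact hl.1 z hz hby
        · exact hcross z (by simp [hz]) y hya hby

-- stability of A's per-genre descending sort, as a Pairwise fact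
lemma sorted_rev_pairwise_stable (l : List (Int × Int))
    (hl : l.Pairwise (fun a b => a.2 < b.2)) :
    (PySem.List.sorted l (fun x => x.1) true).Pairwise
      (fun a b => b.1 < a.1 ∨ (b.1 = a.1 ∧ a.2 < b.2)) := by
  rw [PySem.List.sorted_rev_eq_foldl_insertBy]
  refine foldl_insertBy_pairwise _ _ l ?_ ?_ ?_
  · intro x _ y hby
    left; simpa using hby
  · intro x _ a b hab hba
    simp only [decide_eq_true_eq] at hba
    left
    rcases hab with h | ⟨h, _⟩ <;> omega
  · refine hl.imp ?_
    intro a b hab hba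
    simp only [decide_eq_false_iff_not, not_lt] at hba
    rcases lt_or_eq_of_le hba with h | h
    · exact Or.inl h
    · exact Or.inr ⟨h, hab⟩

-- stability of B's global ascending sort, as a Pairwise fact
lemma sorted_asc_pairwise_stable (key : Int → Int) (l : List Int)
    (hl : l.Pairwise (· < ·)) :
    (PySem.List.sorted l key false).Pairwise
      (fun i j => key i < key j ∨ (key i = key j ∧ i < j)) := by
  rw [PySem.List.sorted_eq_foldl_insertBy]
  refine foldl_insertBy_pairwise _ _ l ?_ ?_ ?_
  · intro x _ y hby
    left; simpa using hby
  · intro x _ a b hab hba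
    simp only [decide_eq_true_eq] at hba
    left
    rcases hab with h | ⟨h, _⟩ <;> omega
  · refine hl.imp ?_
    intro a b hab hba
    simp only [decide_eq_false_iff_not, not_lt] at hba
    rcases lt_or_eq_of_le hba with h | h
    · exact Or.inl h
    · exact Or.inr ⟨h, hab⟩

-- the per-genre bucket dict A builds maps g to the (play, index) pairs of genre g, in index order
lemma each_fold_getD (genres : List String) (plays : List Int) (g : String) (m : Nat) :
    (((PySem.List.pyRange 0 (m : Int) 1).foldl
        (fun (d : PySem.Dict String (List (Int × Int))) i =>
          d.insert (PySem.List.pyGetD genres i "")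
            (d.getD (PySem.List.pyGetD genres i "") [] ++ [(PySem.List.pyGetD plays i 0, i)]))
        PySem.Dict.empty).getD g [])
      = ((PySem.List.pyRange 0 (m : Int) 1).filter
          (fun i => PySem.List.pyGetD genres i "" == g)).map
          (fun i => (PySem.List.pyGetD plays i 0, i)) := by
  induction m with
  | zero => simp [PySem.List.pyRange, PySem.Dict.getD, PySem.Dict.get?, PySem.Dict.empty]
  | succ m ih =>
      have hcast : ((m + 1 : Nat) : Int) = (m : Int) + 1 := by push_cast; ring
      rw [hcast, PySem.List.pyRange_one_succ_right (Int.natCast_nonneg m)]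
      rw [List.foldl_append, List.filter_append]
      simp only [List.foldl_cons, List.foldl_nil, List.map_append]
      rw [PySem.Dict.getD_insert]
      by_cases hg : g = PySem.List.pyGetD genres (m : Int) ""
      · rw [if_pos hg, ← hg, ih]
        rw [PySem.List.pyGetD_natCast] at hg
        simp [hg, PySem.List.pyGetD_natCast]
      · rw [if_neg hg, ih]
        rw [PySem.List.pyGetD_natCast] at hg
        simp [List.filter_cons, PySem.List.pyGetD_natCast]
        exact fun h => hg h.symm

-- core: the indices of A's sorted genre-g bucket are exactly the genre-g indices of B's global order
lemma core_eq (genres : List String) (plays : List Int) (g : String) (m : Nat) :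
    ((PySem.List.sorted
        (((PySem.List.pyRange 0 (m : Int) 1).filter
            (fun i => PySem.List.pyGetD genres i "" == g)).map
            (fun i => (PySem.List.pyGetD plays i 0, i)))
        (fun x => x.1) true).map (fun x => x.2))
      = (PySem.List.sorted (PySem.List.pyRange 0 (m : Int) 1)
          (fun j => -(PySem.List.pyGetD plays j 0)) false).filter
          (fun i => PySem.List.pyGetD genres i "" == g) := by
  set P : Int → Int := fun i => PySem.List.pyGetD plays i 0 with hP
  set p : Int → Bool := fun i => PySem.List.pyGetD genres i "" == g with hp
  set R : List Int := PySem.List.pyRange 0 (m : Int) 1 with hR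
  have hRlt : R.Pairwise (· < ·) := by
    rw [hR, PySem.List.pyRange_zero_natCast]
    rw [List.pairwise_map]
    exact (List.pairwise_lt_range).imp (by intro a b h; exact_mod_cast h)
  have hIlt : (R.filter p).Pairwise (· < ·) := hRlt.sublist List.filter_sublist
  have hpairs : ((R.filter p).map (fun i => (P i, i))).Pairwise
      (fun a b => a.2 < b.2) := by
    rw [List.pairwise_map]; exact hIlt
  have hA := sorted_rev_pairwise_stable _ hpairs
  have hB := sorted_asc_pairwise_stable (fun j => -(P j)) R hRlt
  refine PySem.List.eq_of_perm_of_pairwise_le_of_injective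
    (fun i => toLex (-(P i), i)) ?_ ?_ ?_ ?_
  · intro i j h
    have h2 := congrArg (fun x => (ofLex x).2) h
    simpa using h2
  · -- permutation
    have h1 : (PySem.List.sorted ((R.filter p).map (fun i => (P i, i)))
        (fun x => x.1) true).Perm ((R.filter p).map (fun i => (P i, i))) :=
      PySem.List.sorted_perm _ _ _
    have h2 := h1.map (fun x : Int × Int => x.2)
    have h3 : ((R.filter p).map (fun i => (P i, i))).map (fun x : Int × Int => x.2)
        = R.filter p := by rw [List.map_map]; exact List.map_id _
    rw [h3] at h2
    have h4 : ((PySem.List.sorted R (fun j => -(P j)) false).filter p).Perm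
        (R.filter p) := (PySem.List.sorted_perm R _ false).filter p
    exact h2.trans h4.symm
  · rw [List.pairwise_map]
    refine List.Pairwise.imp_of_mem ?_ hA
    intro a b ha hb hab
    have ha' : a = (P a.2, a.2) := by
      rcases List.mem_map.1 ((PySem.List.mem_sorted _ _ _ _).1 ha) with ⟨i, _, rfl⟩; rfl
    have hb' : b = (P b.2, b.2) := by
      rcases List.mem_map.1 ((PySem.List.mem_sorted _ _ _ _).1 hb) with ⟨i, _, rfl⟩; rfl
    refine le_of_lt (Prod.Lex.toLex_lt_toLex.mpr ?_)
    rcases hab with h | ⟨h, h'⟩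
    · left
      rw [ha', hb'] at h ⊢
      simpa using h
    · right
      constructor
      · rw [ha'] at h; rw [hb'] at h; simp at h ⊢; omega
      · exact h'
  · refine List.Pairwise.imp ?_ (hB.sublist List.filter_sublist)
    intro i j hij
    refine le_of_lt (Prod.Lex.toLex_lt_toLex.mpr ?_)
    rcases hij with h | ⟨h, h'⟩
    · left; simpa using h
    · right; exact ⟨by simpa using h, h'⟩

lemma solution_eq_alt (genres : List String) (plays : List Int) :
    solution genres plays = solution_alt genres plays := by
  unfold solution solution_alt
  rw [PySem.List.foldl_prod_mk
    (f := fun (d : PySem.Dict String Int) i =>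
      d.insert (PySem.List.pyGetD genres i "")
        (d.getD (PySem.List.pyGetD genres i "") 0 + PySem.List.pyGetD plays i 0))
    (g := fun (d : PySem.Dict String (List (Int × Int))) i =>
      d.insert (PySem.List.pyGetD genres i "")
        (d.getD (PySem.List.pyGetD genres i "") [] ++ [(PySem.List.pyGetD plays i 0, i)]))]
  simp only
  congr 1
  funext answer kv
  rw [PySem.List.foldl_append_singleton_eq_map (f := fun pk : Int × Int => pk.2)]
  rw [each_fold_getD, List.map_take, core_eq]

-- ===== VERDICT (by name: the statement is the Claim_ definition above) =====
theorem solution_spec : Claim_equal_solution := by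
  intro genres plays _ _
  unfold Spec_solution
  exact solution_eq_alt genres plays
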